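-- pv_equiv track=rewrite | github.com/EDA-Teaching-RJH/assignment-foundations-of-programming-JCH393 | fleet_manager.py | calculate_payroll
-- ===== SOURCE A (Python) =====
-- def calculate_payroll(ranks):
--     total = 0
--
--     for rank in ranks:
--         if rank == "Captain":
--             total += 1000
--         elif rank == "Commander":
--             total += 800
--         elif rank == "Lieutenant Commander":
--             total += 600
--         elif rank == "Lieutenant":
--             total += 400
--         elif rank == "Ensign":
--             total += 200
--
--     return total
-- ===== SOURCE B (Python) =====
-- PAY_TABLE = {
--     "Captain": 1000,
--     "Commander": 800,
--     "Lieutenant Commander": 600,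
--     "Lieutenant": 400,
--     "Ensign": 200,
-- }
--
-- def calculate_payroll(ranks):
--     counts = {}
--     for r in ranks:
--         counts[r] = counts.get(r, 0) + 1
--     return sum(counts.get(r, 0) * amt for r, amt in PAY_TABLE.items())
-- ===== Notes on version B (the rewrite author's own statement) =====
-- stated objective: alternative
-- what changed: Replaces the per-element if/elif chain with a running total by a two-phase count-then-multiply: build a frequency table of the ranks, then sum count*amount over the fixed pay table.
import Mathlib
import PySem

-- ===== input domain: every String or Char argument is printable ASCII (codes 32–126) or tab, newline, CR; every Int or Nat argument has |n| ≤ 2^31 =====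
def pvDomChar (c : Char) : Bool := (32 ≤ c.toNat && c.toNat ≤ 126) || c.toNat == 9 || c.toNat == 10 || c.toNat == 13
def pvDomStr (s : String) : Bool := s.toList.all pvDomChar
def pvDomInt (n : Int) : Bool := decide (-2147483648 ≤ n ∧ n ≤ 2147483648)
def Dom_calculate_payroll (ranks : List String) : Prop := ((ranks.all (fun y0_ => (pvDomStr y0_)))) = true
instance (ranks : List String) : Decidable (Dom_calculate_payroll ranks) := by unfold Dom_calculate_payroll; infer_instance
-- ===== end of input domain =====

-- B replaces A's per-element if/elif running total by a two-phase count-then-multiply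
-- over a fixed pay table (alternative decomposition; same asymptotic cost).

-- ===== PORT A =====
def calculate_payroll (ranks : List String) : Int :=
  ranks.foldl (fun total rank =>
    if rank == "Captain" then total + 1000
    else if rank == "Commander" then total + 800
    else if rank == "Lieutenant Commander" then total + 600
    else if rank == "Lieutenant" then total + 400
    else if rank == "Ensign" then total + 200
    else total) 0

-- ===== PORT B =====
def pvPayTable : List (String × Int) :=
  [("Captain", 1000), ("Commander", 800), ("Lieutenant Commander", 600),
   ("Lieutenant", 400), ("Ensign", 200)]

def calculate_payroll_alt (ranks : List String) : Int :=
  let counts : PySem.Dict String Int :=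
    ranks.foldl (fun d r => d.insert r (d.getD r 0 + 1)) PySem.Dict.empty
  (pvPayTable.map (fun p => counts.getD p.1 0 * p.2)).sum

-- ===== PRECONDITION & SPEC =====
def Spec_calculate_payroll (ranks : List String) (out : Int) : Prop := out = calculate_payroll_alt ranks
instance (ranks : List String) (out : Int) : Decidable (Spec_calculate_payroll ranks out) := by unfold Spec_calculate_payroll; infer_instance

-- ===== CLAIM (what is proved, stated in full; the proofs are below) =====
def Claim_equal_calculate_payroll : Prop := ∀ (ranks : List String), Dom_calculate_payroll ranks → Spec_calculate_payroll ranks (calculate_payroll ranks)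

-- ===== LEMMAS AND PROOFS =====

-- A's loop computes the weighted sum of per-rank counts.
theorem calcA_loop_counts (ranks : List String) (init : Int) :
    ranks.foldl (fun total rank =>
      if rank == "Captain" then total + 1000
      else if rank == "Commander" then total + 800
      else if rank == "Lieutenant Commander" then total + 600
      else if rank == "Lieutenant" then total + 400
      else if rank == "Ensign" then total + 200
      else total) init
    = init + 1000 * (ranks.count "Captain" : Int) + 800 * (ranks.count "Commander" : Int)
        + 600 * (ranks.count "Lieutenant Commander" : Int)
        + 400 * (ranks.count "Lieutenant" : Int) + 200 * (ranks.count "Ensign" : Int) := by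
  induction ranks generalizing init with
  | nil => simp
  | cons r rs ih =>
    simp only [List.foldl_cons, ih, List.count_cons]
    by_cases h1 : r = "Captain" <;> by_cases h2 : r = "Commander" <;>
      by_cases h3 : r = "Lieutenant Commander" <;> by_cases h4 : r = "Lieutenant" <;>
      by_cases h5 : r = "Ensign" <;>
      simp_all <;> ring

-- ===== VERDICT (by name: the statement is the Claim_ definition above) =====
theorem calculate_payroll_spec : Claim_equal_calculate_payroll := by
  intro ranks _
  unfold Spec_calculate_payroll calculate_payroll calculate_payroll_alt
  simp only [PySem.Dict.getD_foldl_insert_add_one, pvPayTable, List.map, List.sum_cons,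
    List.sum_nil]
  rw [calcA_loop_counts]
  simp [PySem.Dict.getD]
  ring
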